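-- pv_equiv track=rewrite | github.com/Napoleoncqf/pixiv-manga-translator | src/core/manga_insight/incremental_analyzer.py | _build_contiguous_batches
-- ===== SOURCE A (Python) =====
-- from typing import Dict, List, Optional, Callable
--
-- def _build_contiguous_batches(page_nums: List[int], pages_per_batch: int) -> List[List[int]]:
--     """将页码按连续段分批。"""
--     normalized_pages = sorted({
--         page_num for page_num in page_nums
--         if isinstance(page_num, int) and not isinstance(page_num, bool) and page_num > 0
--     })
--     if not normalized_pages:
--         return []
--
--     contiguous_ranges: List[List[int]] = []
--     current_range = [normalized_pages[0]]
--     for page_num in normalized_pages[1:]: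
--         if page_num == current_range[-1] + 1:
--             current_range.append(page_num)
--         else:
--             contiguous_ranges.append(current_range)
--             current_range = [page_num]
--     contiguous_ranges.append(current_range)
--
--     batches: List[List[int]] = []
--     for page_range in contiguous_ranges:
--         for i in range(0, len(page_range), pages_per_batch):
--             batches.append(page_range[i:i + pages_per_batch])
--     return batches
-- ===== SOURCE B (Python) =====
-- from typing import List
--
-- def _build_contiguous_batches(page_nums: List[int], pages_per_batch: int) -> List[List[int]]:
--     """Set-membership run detection: a run starts at p iff p-1 is not a page;
--     walk each start forward to its run end, materialize the run, chunk it."""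
--     pages = {
--         page_num for page_num in page_nums
--         if isinstance(page_num, int) and not isinstance(page_num, bool) and page_num > 0
--     }
--     batches: List[List[int]] = []
--     for start in sorted(p for p in pages if p - 1 not in pages):
--         end = start
--         while end + 1 in pages:
--             end += 1
--         run = list(range(start, end + 1))
--         for i in range(0, len(run), pages_per_batch):
--             batches.append(run[i:i + pages_per_batch])
--     return batches
-- ===== Notes on version B (the rewrite author's own statement) =====
-- stated objective: alternative
-- what changed: Replaces sort-everything-then-scan-into-runs by set-membership run detection: run starts are the positive pages p with p-1 not in the page set, only the starts are sorted, each run end is found by walking end+1 membership, and the run is materialized with range(start, end+1) before the same chunking loop.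
import Mathlib
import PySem

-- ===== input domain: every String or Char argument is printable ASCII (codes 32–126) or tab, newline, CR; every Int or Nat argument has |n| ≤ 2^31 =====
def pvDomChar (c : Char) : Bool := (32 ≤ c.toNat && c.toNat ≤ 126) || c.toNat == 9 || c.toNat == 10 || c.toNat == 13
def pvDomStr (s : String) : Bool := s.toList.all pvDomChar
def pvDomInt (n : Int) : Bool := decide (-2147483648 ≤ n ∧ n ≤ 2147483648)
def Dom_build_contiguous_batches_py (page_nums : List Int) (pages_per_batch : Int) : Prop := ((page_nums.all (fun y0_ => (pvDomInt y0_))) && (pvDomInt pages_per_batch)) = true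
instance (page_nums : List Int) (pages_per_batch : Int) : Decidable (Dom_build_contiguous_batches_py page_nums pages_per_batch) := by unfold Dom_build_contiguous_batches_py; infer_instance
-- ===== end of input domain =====

-- B replaces A's sort-then-scan run grouping by set-membership run detection: it sorts only
-- the run starts (pages p with p-1 not in the page set), walks each run to its end by
-- membership tests, materializes the run as a range and chunks it. Objective: alternative.

-- ===== PORT A =====
def build_contiguous_batches_py (page_nums : List Int) (pages_per_batch : Int) : List (List Int) :=
  let normalized_pages : List Int :=
    PySem.List.sorted (PySem.Set.ofList (page_nums.filter (fun p => 0 < p))) (fun x => x) false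
  match normalized_pages with
  | [] => []
  | h :: t =>
    let st := t.foldl
      (fun (s : List (List Int) × List Int) page_num =>
        if page_num = PySem.List.pyGetD s.2 (-1) 0 + 1 then (s.1, s.2 ++ [page_num])
        else (s.1 ++ [s.2], [page_num]))
      ([], [h])
    let contiguous_ranges := st.1 ++ [st.2]
    contiguous_ranges.foldl
      (fun batches page_range =>
        (PySem.List.pyRange 0 (page_range.length : Int) pages_per_batch).foldl
          (fun bs i => bs ++ [PySem.List.slice page_range (some i) (some (i + pages_per_batch))])
          batches)
      []

-- ===== PORT B =====
-- the 'while end + 1 in pages: end += 1' loop; fuel = len(pages) is exact because each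
-- accepted end is a fresh member of pages, so the loop body runs at most len(pages) times
def pvWalkEnd (pages : List Int) : Nat → Int → Int
  | 0, e => e
  | f + 1, e => if (e + 1) ∈ pages then pvWalkEnd pages f (e + 1) else e

def build_contiguous_batches_py_alt (page_nums : List Int) (pages_per_batch : Int) : List (List Int) :=
  let pages : PySem.Set Int := PySem.Set.ofList (page_nums.filter (fun p => 0 < p))
  let starts : List Int :=
    PySem.List.sorted (pages.filter (fun p => decide ((p - 1) ∉ pages))) (fun x => x) false
  starts.foldl
    (fun batches start =>
      let e := pvWalkEnd pages pages.length start
      let run := PySem.List.pyRange start (e + 1) 1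
      (PySem.List.pyRange 0 (run.length : Int) pages_per_batch).foldl
        (fun bs i => bs ++ [PySem.List.slice run (some i) (some (i + pages_per_batch))])
        batches)
    []

-- ===== PRECONDITION & SPEC =====
-- Pre_ excludes pages_per_batch = 0 together with a positive page number: there Python A
-- (and B) raise ValueError from range(0, len, 0); when no positive page exists A returns [] early.
def Pre_build_contiguous_batches_py (page_nums : List Int) (pages_per_batch : Int) : Prop :=
  pages_per_batch ≠ 0 ∨ ∀ p ∈ page_nums, p ≤ 0
instance (page_nums : List Int) (pages_per_batch : Int) : Decidable (Pre_build_contiguous_batches_py page_nums pages_per_batch) := by unfold Pre_build_contiguous_batches_py; infer_instance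

def pvWitness_build_contiguous_batches_py : List Int × Int := ([1, 2, 5], 2)

def Spec_build_contiguous_batches_py (page_nums : List Int) (pages_per_batch : Int) (out : List (List Int)) : Prop := out = build_contiguous_batches_py_alt page_nums pages_per_batch
instance (page_nums : List Int) (pages_per_batch : Int) (out : List (List Int)) : Decidable (Spec_build_contiguous_batches_py page_nums pages_per_batch out) := by unfold Spec_build_contiguous_batches_py; infer_instance

-- ===== CLAIM (what is proved, stated in full; the proofs are below) =====
def Claim_equal_build_contiguous_batches_py : Prop := ∀ (page_nums : List Int) (pages_per_batch : Int), Dom_build_contiguous_batches_py page_nums pages_per_batch → Pre_build_contiguous_batches_py page_nums pages_per_batch → Spec_build_contiguous_batches_py page_nums pages_per_batch (build_contiguous_batches_py page_nums pages_per_batch)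

-- ===== LEMMAS AND PROOFS =====

-- recursive form of A's run-building loop
def pvRunsA (cur : List Int) : List Int → List (List Int)
  | [] => [cur]
  | p :: rest =>
    if p = PySem.List.pyGetD cur (-1) 0 + 1 then pvRunsA (cur ++ [p]) rest
    else cur :: pvRunsA [p] rest

-- number of elements of L strictly above s: the canonical fuel for pvWalkEnd
def pvCnt (L : List Int) (s : Int) : Nat := (L.filter (fun q => decide (s < q))).length

-- the run B produces from a start s, with canonical fuel
def pvRun (L : List Int) (s : Int) : List Int :=
  PySem.List.pyRange s (pvWalkEnd L (pvCnt L s) s + 1) 1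

theorem pvGetLast (l : List Int) (p : Int) :
    PySem.List.pyGetD (l ++ [p]) (-1) 0 = p := by
  simp [PySem.List.pyGetD, PySem.List.pyGet?, PySem.List.pyIdx?]

theorem pvGetLast1 (p : Int) : PySem.List.pyGetD [p] (-1) 0 = p := pvGetLast [] p

theorem pvRunsA_append (t : List Int) (cur : List Int) (p : Int) :
    pvRunsA (cur ++ [p]) t = (cur ++ (pvRunsA [p] t).headI) :: (pvRunsA [p] t).tail := by
  induction t generalizing cur p with
  | nil => simp [pvRunsA]
  | cons q rest ih =>
    simp only [pvRunsA, pvGetLast, pvGetLast1]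
    split_ifs with h
    · rw [ih (cur ++ [p]) q, ih [p] q]
      simp
    · simp [List.headI]

theorem pvFoldA_eq (t : List Int) (done : List (List Int)) (cur : List Int) :
    (t.foldl
      (fun (s : List (List Int) × List Int) page_num =>
        if page_num = PySem.List.pyGetD s.2 (-1) 0 + 1 then (s.1, s.2 ++ [page_num])
        else (s.1 ++ [s.2], [page_num]))
      (done, cur)).1 ++
    [(t.foldl
      (fun (s : List (List Int) × List Int) page_num =>
        if page_num = PySem.List.pyGetD s.2 (-1) 0 + 1 then (s.1, s.2 ++ [page_num])
        else (s.1 ++ [s.2], [page_num]))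
      (done, cur)).2] = done ++ pvRunsA cur t := by
  induction t generalizing done cur with
  | nil => simp [pvRunsA]
  | cons p rest ih =>
    simp only [List.foldl_cons, pvRunsA]
    split_ifs with h
    · rw [ih]
    · rw [ih]; simp

theorem pvCnt_lt (L : List Int) (s a : Int) (ha : a ∈ L) (h1 : s < a) (h2 : a ≤ s + 1) :
    pvCnt L a < pvCnt L s := by
  have hsub : (L.filter (fun q => decide (a < q))).Sublist (L.filter (fun q => decide (s < q))) :=
    List.monotone_filter_right L (fun x hx => by simp at hx ⊢; omega)
  have hmem : a ∈ L.filter (fun q => decide (s < q)) := by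
    simp [List.mem_filter, ha, h1]
  have hnmem : a ∉ L.filter (fun q => decide (a < q)) := by
    simp [List.mem_filter]
  unfold pvCnt
  rcases Nat.lt_or_ge (L.filter (fun q => decide (a < q))).length (L.filter (fun q => decide (s < q))).length with h1 | h1
  · exact h1
  · exact absurd (hsub.eq_of_length (Nat.le_antisymm hsub.length_le h1) ▸ hmem) hnmem

theorem pvWalkEnd_stable (L : List Int) : ∀ (f : Nat) (s : Int), pvCnt L s ≤ f →
    pvWalkEnd L (f + 1) s = pvWalkEnd L f s := by
  intro f
  induction f with
  | zero =>
    intro s hs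
    have : (s + 1) ∉ L := by
      intro hmem
      have := pvCnt_lt L s (s + 1) hmem (by omega) (by omega)
      omega
    simp [pvWalkEnd, this]
  | succ f ih =>
    intro s hs
    show pvWalkEnd L (f + 2) s = pvWalkEnd L (f + 1) s
    by_cases hmem : (s + 1) ∈ L
    · have : pvWalkEnd L (f + 2) s = pvWalkEnd L (f + 1) (s + 1) := by simp [pvWalkEnd, hmem]
      rw [this]
      have : pvWalkEnd L (f + 1) s = pvWalkEnd L f (s + 1) := by simp [pvWalkEnd, hmem]
      rw [this]
      exact ih (s + 1) (by have := pvCnt_lt L s (s + 1) hmem (by omega) (by omega); omega)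
    · simp [pvWalkEnd, hmem]

theorem pvWalkEnd_of_ge (L : List Int) (f : Nat) (s : Int) (h : pvCnt L s ≤ f) :
    pvWalkEnd L f s = pvWalkEnd L (pvCnt L s) s := by
  obtain ⟨k, rfl⟩ : ∃ k, f = pvCnt L s + k := ⟨f - pvCnt L s, by omega⟩
  induction k with
  | zero => rfl
  | succ k ih =>
    rw [show pvCnt L s + (k + 1) = (pvCnt L s + k) + 1 from rfl,
      pvWalkEnd_stable L (pvCnt L s + k) s (by omega)]
    exact ih (by omega)

theorem pvWalkEnd_congr (L M : List Int) : ∀ (f : Nat) (s : Int),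
    (∀ q, s < q → (q ∈ L ↔ q ∈ M)) → pvWalkEnd L f s = pvWalkEnd M f s := by
  intro f
  induction f with
  | zero => intro s _; rfl
  | succ f ih =>
    intro s h
    by_cases hm : (s + 1) ∈ M
    · have hl : (s + 1) ∈ L := (h (s + 1) (by omega)).2 hm
      simp only [pvWalkEnd, if_pos hm, if_pos hl]
      exact ih (s + 1) (fun q hq => h q (by omega))
    · have hl : (s + 1) ∉ L := fun hc => hm ((h (s + 1) (by omega)).1 hc)
      simp only [pvWalkEnd, if_neg hm, if_neg hl]

theorem pvWalkEnd_le (L : List Int) : ∀ (f : Nat) (s : Int), s ≤ pvWalkEnd L f s := by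
  intro f
  induction f with
  | zero => intro s; exact le_refl s
  | succ f ih =>
    intro s
    simp only [pvWalkEnd]
    split_ifs with h
    · exact le_trans (by omega) (ih (s + 1))
    · exact le_refl s

theorem pvCnt_cons_of_lt (x : Int) (xs : List Int) (s : Int) (h : x ≤ s) :
    pvCnt (x :: xs) s = pvCnt xs s := by
  unfold pvCnt
  simp [show ¬ s < x by omega]

theorem pvRun_cons_of_lt (x : Int) (xs : List Int) (s : Int) (h : x < s) :
    pvRun (x :: xs) s = pvRun xs s := by
  unfold pvRun
  rw [pvCnt_cons_of_lt x xs s (by omega),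
    pvWalkEnd_congr (x :: xs) xs _ s (fun q hq => by simp; omega)]

theorem pvRun_singleton (L : List Int) (x : Int) (hx : (x + 1) ∉ L) :
    pvRun L x = [x] := by
  have hw : pvWalkEnd L (pvCnt L x) x = x := by
    cases h : pvCnt L x with
    | zero => rfl
    | succ k => simp [pvWalkEnd, hx]
  unfold pvRun
  rw [hw, PySem.List.pyRange_one_cons (show x < x + 1 by omega)]
  simp [PySem.List.pyRange]

-- the main structure lemma: on a strictly increasing list, A's scan-runs are B's start-walk runs
theorem pvRuns_eq : ∀ (xs : List Int) (x : Int), (x :: xs).Pairwise (· < ·) →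
    pvRunsA [x] xs =
      ((x :: xs).filter (fun p => decide ((p - 1) ∉ (x :: xs)))).map (pvRun (x :: xs)) := by
  intro xs
  induction xs with
  | nil =>
    intro x _
    simp [pvRunsA, List.filter, pvRun_singleton [x] x (by simp), show (x:Int) - 1 ≠ x by omega]
  | cons y ys ih =>
    intro x hp
    have hxy : x < y := (List.pairwise_cons.1 hp).1 y (by simp)
    have hys : ∀ p ∈ ys, y < p := (List.pairwise_cons.1 (List.pairwise_cons.1 hp).2).1
    have hxys : ∀ p ∈ ys, x < p := fun p hpy => lt_trans hxy (hys p hpy)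
    have hpx : (x - 1) ∉ (x :: y :: ys) := by
      simp only [List.mem_cons, not_or]
      refine ⟨by omega, by omega, fun hmem => by have := hxys _ hmem; omega⟩
    have hIH := ih y (List.pairwise_cons.1 hp).2
    by_cases hy : y = x + 1
    · -- y continues x's run
      subst hy
      -- LHS
      have hL : pvRunsA [x] ((x + 1) :: ys) = pvRunsA ([x] ++ [x + 1]) ys := by
        simp [pvRunsA, pvGetLast1]
      -- filters
      have hfy : (((x + 1) :: ys).filter (fun p => decide ((p - 1) ∉ ((x + 1) :: ys)))) =
          (x + 1) :: ys.filter (fun p => decide ((p - 1) ∉ ((x + 1) :: ys))) := by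
        have hh : ((x + 1 : Int) - 1) ∉ ((x + 1) :: ys) := by
          simp only [List.mem_cons, not_or]
          exact ⟨by omega, fun hmem => by have := hys _ hmem; omega⟩
        rw [List.filter_cons_of_pos (by simpa using hh)]
      have hfL : ((x :: (x + 1) :: ys).filter (fun p => decide ((p - 1) ∉ (x :: (x + 1) :: ys)))) =
          x :: ys.filter (fun p => decide ((p - 1) ∉ (x :: (x + 1) :: ys))) := by
        rw [List.filter_cons_of_pos (by simpa using hpx),
            List.filter_cons_of_neg (by simp [show (x + 1 : Int) - 1 = x by ring])]
      have hfc : ys.filter (fun p => decide ((p - 1) ∉ (x :: (x + 1) :: ys))) =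
          ys.filter (fun p => decide ((p - 1) ∉ ((x + 1) :: ys))) := by
        apply List.filter_congr
        intro p hpy
        have := hys p hpy
        simp only [decide_eq_decide, List.mem_cons, not_or]
        constructor
        · rintro ⟨_, h2, h3⟩; exact ⟨h2, h3⟩
        · rintro ⟨h2, h3⟩; exact ⟨by omega, h2, h3⟩
      -- run congruences for starts in ys
      have hrc : ∀ p ∈ ys.filter (fun p => decide ((p - 1) ∉ ((x + 1) :: ys))),
          pvRun (x :: (x + 1) :: ys) p = pvRun ((x + 1) :: ys) p := by
        intro p hpf
        exact pvRun_cons_of_lt _ _ _ (hxys p (List.mem_of_mem_filter hpf))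
      -- the head run: pvRun L x = x :: pvRun (x+1::ys) (x+1)
      have hhead : pvRun (x :: (x + 1) :: ys) x = x :: pvRun ((x + 1) :: ys) (x + 1) := by
        have hmem : (x + 1) ∈ (x :: (x + 1) :: ys) := by simp
        have hcnt1 : 1 ≤ pvCnt (x :: (x + 1) :: ys) x := by
          have : (x + 1) ∈ (x :: (x + 1) :: ys).filter (fun q => decide (x < q)) := by
            simp [List.mem_filter]
          unfold pvCnt
          exact List.length_pos_of_mem this
        obtain ⟨k, hk⟩ : ∃ k, pvCnt (x :: (x + 1) :: ys) x = k + 1 :=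
          ⟨pvCnt (x :: (x + 1) :: ys) x - 1, by omega⟩
        have hstep : pvWalkEnd (x :: (x + 1) :: ys) (pvCnt (x :: (x + 1) :: ys) x) x =
            pvWalkEnd (x :: (x + 1) :: ys) k (x + 1) := by
          rw [hk]; simp [pvWalkEnd, hmem]
        have hk2 : pvCnt (x :: (x + 1) :: ys) (x + 1) ≤ k := by
          have := pvCnt_lt (x :: (x + 1) :: ys) x (x + 1) hmem (by omega) (by omega)
          omega
        have he : pvWalkEnd (x :: (x + 1) :: ys) k (x + 1) =
            pvWalkEnd (x :: (x + 1) :: ys) (pvCnt (x :: (x + 1) :: ys) (x + 1)) (x + 1) :=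
          pvWalkEnd_of_ge _ k (x + 1) hk2
        unfold pvRun
        rw [hstep, he, pvCnt_cons_of_lt x ((x + 1) :: ys) (x + 1) (by omega),
          pvWalkEnd_congr (x :: (x + 1) :: ys) ((x + 1) :: ys) _ (x + 1)
            (fun q hq => by
              simp only [List.mem_cons]
              constructor
              · rintro (rfl | h2)
                · omega
                · exact h2
              · intro h2
                exact Or.inr h2)]
        rw [PySem.List.pyRange_one_cons
          (by have := pvWalkEnd_le ((x + 1) :: ys) (pvCnt ((x + 1) :: ys) (x + 1)) (x + 1); omega)]
      rw [hL, pvRunsA_append ys [x] (x + 1), hIH, hfy, hfL, hfc]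
      simp only [List.map_cons]
      rw [List.map_congr_left hrc]
      simp [hhead]
    · -- y starts a new run: x's run is the singleton [x]
      have hy2 : x + 1 < y := by omega
      have hnx1 : (x + 1) ∉ (x :: y :: ys) := by
        simp only [List.mem_cons, not_or]
        exact ⟨by omega, by omega, fun hmem => by have := hys _ hmem; omega⟩
      have hL : pvRunsA [x] (y :: ys) = [x] :: pvRunsA [y] ys := by
        simp [pvRunsA, pvGetLast1, hy]
      have hfL : ((x :: y :: ys).filter (fun p => decide ((p - 1) ∉ (x :: y :: ys)))) =
          x :: (y :: ys).filter (fun p => decide ((p - 1) ∉ (x :: y :: ys))) := by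
        rw [List.filter_cons_of_pos (by simpa using hpx)]
      have hfc : (y :: ys).filter (fun p => decide ((p - 1) ∉ (x :: y :: ys))) =
          (y :: ys).filter (fun p => decide ((p - 1) ∉ (y :: ys))) := by
        apply List.filter_congr
        intro p hpy
        have hpgt : x + 1 < p := by
          rcases List.mem_cons.1 hpy with rfl | hmem
          · exact hy2
          · have := hys p hmem; omega
        simp only [decide_eq_decide, List.mem_cons, not_or]
        constructor
        · rintro ⟨_, h2, h3⟩; exact ⟨h2, h3⟩
        · rintro ⟨h2, h3⟩; exact ⟨by omega, h2, h3⟩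
      have hrc : ∀ p ∈ (y :: ys).filter (fun p => decide ((p - 1) ∉ (y :: ys))),
          pvRun (x :: y :: ys) p = pvRun (y :: ys) p := by
        intro p hpf
        have hpm := List.mem_of_mem_filter hpf
        have hpgt : x < p := by
          rcases List.mem_cons.1 hpm with rfl | hmem
          · exact hxy
          · exact hxys p hmem
        exact pvRun_cons_of_lt _ _ _ hpgt
      rw [hL, hIH, hfL, List.map_cons, pvRun_singleton _ x hnx1, hfc,
        List.map_congr_left hrc]

-- A = B for a fixed page set S, assuming sorted(S) is strictly increasing
theorem pvFinal (S : List Int) (ppb : Int)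
    (hpl : (PySem.List.sorted S (fun x => x) false).Pairwise (· < ·)) :
    (match PySem.List.sorted S (fun x => x) false with
     | [] => ([] : List (List Int))
     | h :: t =>
       let st := t.foldl (fun (s : List (List Int) × List Int) page_num =>
          if page_num = PySem.List.pyGetD s.2 (-1) 0 + 1 then (s.1, s.2 ++ [page_num])
          else (s.1 ++ [s.2], [page_num])) ([], [h])
       (st.1 ++ [st.2]).foldl
         (fun batches page_range =>
           (PySem.List.pyRange 0 (page_range.length : Int) ppb).foldl
             (fun bs i => bs ++ [PySem.List.slice page_range (some i) (some (i + ppb))]) batches) []) =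
    (PySem.List.sorted (S.filter (fun p => decide ((p - 1) ∉ S))) (fun x => x) false).foldl
      (fun batches start =>
        let e := pvWalkEnd S S.length start
        let run := PySem.List.pyRange start (e + 1) 1
        (PySem.List.pyRange 0 (run.length : Int) ppb).foldl
          (fun bs i => bs ++ [PySem.List.slice run (some i) (some (i + ppb))]) batches) [] := by
  cases hn : PySem.List.sorted S (fun x => x) false with
  | nil =>
    have hSnil : S = [] := (PySem.List.sorted_eq_nil_iff _ _ _).1 hn
    subst hSnil
    have h2 : PySem.List.sorted ((([] : List Int)).filter (fun p => decide ((p - 1) ∉ ([] : List Int)))) (fun x => x) false = [] := by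
      simp [PySem.List.sorted_eq_nil_iff]
    rw [h2]
    rfl
  | cons h t =>
    have hperm : (h :: t).Perm S := by rw [← hn]; exact PySem.List.sorted_perm _ _ _
    rw [hn] at hpl
    have hmemLS : ∀ q : Int, q ∈ (h :: t) ↔ q ∈ S := fun q => hperm.mem_iff
    have hstarts : PySem.List.sorted (S.filter (fun p => decide ((p - 1) ∉ S))) (fun x => x) false =
        (h :: t).filter (fun p => decide ((p - 1) ∉ (h :: t))) := by
      have e1 : (h :: t).filter (fun p => decide ((p - 1) ∉ (h :: t))) =
          (h :: t).filter (fun p => decide ((p - 1) ∉ S)) :=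
        List.filter_congr (fun p _ => by simp [hmemLS])
      refine PySem.List.sorted_eq_of_perm_of_pairwise_lt _ _ _ ?_ ?_
      · rw [e1]
        exact hperm.filter _
      · exact List.Pairwise.filter _ hpl
    have hwalk : ∀ s : Int, pvWalkEnd S S.length s = pvWalkEnd (h :: t) (pvCnt (h :: t) s) s := by
      intro s
      rw [← pvWalkEnd_congr (h :: t) S S.length s (fun q _ => hmemLS q)]
      apply pvWalkEnd_of_ge
      calc pvCnt (h :: t) s ≤ (h :: t).length := List.length_filter_le _ _
        _ = S.length := hperm.length_eq
    rw [hstarts]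
    simp only []
    rw [pvFoldA_eq t [] [h], List.nil_append, pvRuns_eq t h hpl, List.foldl_map]
    apply PySem.List.foldl_congr_mem
    intro acc s _
    rw [pvRun, ← hwalk s]

-- ===== VERDICT (by name: the statement is the Claim_ definition above) =====
theorem build_contiguous_batches_py_spec : Claim_equal_build_contiguous_batches_py := by
  intro page_nums ppb _ _
  unfold Spec_build_contiguous_batches_py
  unfold build_contiguous_batches_py build_contiguous_batches_py_alt
  exact pvFinal (PySem.Set.ofList (page_nums.filter (fun p => 0 < p))) ppb
    (PySem.List.sorted_ofList_pairwise_lt _)
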